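-- pv_equiv track=rewrite | github.com/steinarvk/notify | mail.py | has_email_headers
-- ===== SOURCE A (Python) =====
-- def has_email_headers(message, require=("Subject")):
--     lines = message.splitlines()
--     try:
--         header_terminator_index = lines.index("")
--     except ValueError:
--         return False
--     headers = lines[:header_terminator_index]
--     unmet = set(require)
--     for header in headers:
--         if ":" not in header:
--             return False
--         next_unmet = set()
--         for req in unmet:
--             if req not in header:
--                 next_unmet.add(req)
--         unmet = next_unmet
--     return not unmet
-- ===== SOURCE B (Python) =====
-- def has_email_headers(message, require=("Subject")):
--     lines = message.splitlines()
--     try: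
--         headers = lines[:lines.index("")]
--     except ValueError:
--         return False
--     return all(":" in h for h in headers) and all(
--         any(req in h for h in headers) for req in set(require))
-- ===== Notes on version B (the rewrite author's own statement) =====
-- stated objective: simpler
-- what changed: Replaced the incremental loop that walks the headers while rebuilding a shrinking set of still-unsatisfied requirements with two declarative passes: one all() checking every header contains a colon, and one all()/any() checking every required character occurs in some header.
import Mathlib
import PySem

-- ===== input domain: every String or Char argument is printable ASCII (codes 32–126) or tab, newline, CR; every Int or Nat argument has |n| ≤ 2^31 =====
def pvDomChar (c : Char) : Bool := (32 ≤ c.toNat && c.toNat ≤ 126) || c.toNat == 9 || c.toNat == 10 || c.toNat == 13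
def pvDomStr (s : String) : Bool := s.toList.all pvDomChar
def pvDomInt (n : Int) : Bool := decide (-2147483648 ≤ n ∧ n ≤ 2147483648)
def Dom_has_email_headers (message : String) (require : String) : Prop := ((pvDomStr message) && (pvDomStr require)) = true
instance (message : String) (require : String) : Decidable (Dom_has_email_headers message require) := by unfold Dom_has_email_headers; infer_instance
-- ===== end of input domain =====

-- B replaces A's incremental shrinking 'unmet' set with two declarative all/any passes (objective: simpler).


-- ===== PORT A =====
-- next_unmet = {req in unmet | req not in header}
def pvNextUnmet (h : String) (unmet : List Char) : List Char :=
  unmet.foldl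
    (fun nu req => if PySem.Chars.isIn [req] h.toList then nu else PySem.Set.add nu req)
    PySem.Set.empty

-- the 'for header in headers' loop carrying unmet
def pvHeaderLoop : List String → List Char → Bool
  | [], unmet => unmet.isEmpty
  | h :: t, unmet =>
      if PySem.Str.isIn ":" h then pvHeaderLoop t (pvNextUnmet h unmet) else false

def has_email_headers (message : String) (require : String) : Bool :=
  match PySem.List.index? (PySem.Str.splitlines message) "" with
  | none => false
  | some idx =>
      pvHeaderLoop (PySem.List.slice (PySem.Str.splitlines message) none (some (idx : Int)))
        (PySem.Set.ofList require.toList)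

-- ===== PORT B =====
def has_email_headers_alt (message : String) (require : String) : Bool :=
  match PySem.List.index? (PySem.Str.splitlines message) "" with
  | none => false
  | some idx =>
      (PySem.List.slice (PySem.Str.splitlines message) none (some (idx : Int))).all
          (fun h => PySem.Str.isIn ":" h) &&
        (PySem.Set.ofList require.toList).all
          (fun req =>
            (PySem.List.slice (PySem.Str.splitlines message) none (some (idx : Int))).any
              (fun h => PySem.Chars.isIn [req] h.toList))

-- ===== PRECONDITION & SPEC =====
def Spec_has_email_headers (message : String) (require : String) (out : Bool) : Prop := out = has_email_headers_alt message require
instance (message : String) (require : String) (out : Bool) : Decidable (Spec_has_email_headers message require out) := by unfold Spec_has_email_headers; infer_instance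

-- ===== CLAIM (what is proved, stated in full; the proofs are below) =====
def Claim_equal_has_email_headers : Prop := ∀ (message : String) (require : String), Dom_has_email_headers message require → Spec_has_email_headers message require (has_email_headers message require)

-- ===== LEMMAS AND PROOFS =====

-- the inner fold is a filter, given Nodup and freshness w.r.t. the accumulator
lemma pvNextUnmet_go (h : String) (unmet s : List Char)
    (hn : unmet.Nodup) (hf : ∀ x ∈ unmet, x ∉ s) :
    unmet.foldl
      (fun nu req => if PySem.Chars.isIn [req] h.toList then nu else PySem.Set.add nu req) s
    = s ++ unmet.filter (fun req => !PySem.Chars.isIn [req] h.toList) := by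
  induction unmet generalizing s with
  | nil => simp
  | cons r rest ih =>
      have hr : r ∉ rest := (List.nodup_cons.mp hn).1
      have hn' : rest.Nodup := (List.nodup_cons.mp hn).2
      by_cases hin : PySem.Chars.isIn [r] h.toList = true
      · simp [List.foldl_cons, hin, ih s hn' (fun x hx => hf x (List.mem_cons_of_mem _ hx))]
      · have hrs : r ∉ s := hf r (by simp)
        have hadd : PySem.Set.add s r = s ++ [r] := by
          simp [PySem.Set.add]
          exact hrs
        have hf' : ∀ x ∈ rest, x ∉ s ++ [r] := by
          intro x hx
          simp only [List.mem_append, List.mem_singleton]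
          rintro (hs | rfl)
          · exact hf x (List.mem_cons_of_mem _ hx) hs
          · exact hr hx
        simp [List.foldl_cons, hin, hadd, ih (s ++ [r]) hn' hf', List.append_assoc]

lemma pvNextUnmet_eq_filter (h : String) (unmet : List Char) (hn : unmet.Nodup) :
    pvNextUnmet h unmet = unmet.filter (fun req => !PySem.Chars.isIn [req] h.toList) := by
  simpa [pvNextUnmet, PySem.Set.empty] using
    pvNextUnmet_go h unmet [] hn (by simp)

lemma pvHeaderLoop_eq (hs : List String) (unmet : List Char) (hn : unmet.Nodup) :
    pvHeaderLoop hs unmet =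
      (hs.all (fun h => PySem.Str.isIn ":" h) &&
        unmet.all (fun req => hs.any (fun h => PySem.Chars.isIn [req] h.toList))) := by
  induction hs generalizing unmet with
  | nil =>
      cases unmet <;> simp [pvHeaderLoop]
  | cons h t ih =>
      by_cases hc : PySem.Str.isIn ":" h = true
      · rw [pvHeaderLoop, if_pos hc, pvNextUnmet_eq_filter h unmet hn,
          ih _ (hn.filter _)]
        simp only [List.all_cons, List.any_cons, hc, Bool.true_and]
        congr 1
        rw [List.all_filter]
        congr 1
        funext req
        cases hreq : PySem.Chars.isIn [req] h.toList <;> simp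
      · have hc' : PySem.Str.isIn ":" h = false := Bool.eq_false_iff.mpr hc
        rw [pvHeaderLoop, if_neg hc]
        simp only [List.all_cons, hc', Bool.false_and]

-- ===== VERDICT (by name: the statement is the Claim_ definition above) =====
theorem has_email_headers_spec : Claim_equal_has_email_headers := by
  intro message require _
  unfold Spec_has_email_headers has_email_headers has_email_headers_alt
  cases hidx : PySem.List.index? (PySem.Str.splitlines message) "" with
  | none => rfl
  | some idx => exact pvHeaderLoop_eq _ _ (PySem.Set.nodup_ofList _)
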